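-- pv_equiv track=rewrite | github.com/y96266222-glitch/i0i0i | src/routes/chatbot.py | search_in_data
-- ===== SOURCE A (Python) =====
-- def search_in_data(question, data_content):
--     """البحث في البيانات المحلية"""
--     if not data_content:
--         return None
--
--     # بحث بسيط في النص
--     question_words = question.lower().split()
--     data_lower = data_content.lower()
--
--     # إذا وجدت كلمات من السؤال في البيانات
--     found_words = [word for word in question_words if word in data_lower]
--     if len(found_words) >= 2:  # إذا وجدت كلمتين على الأقل
--         # استخراج الجزء المناسب من البيانات
--         lines = data_content.split('\n')
--         relevant_lines = []
--         for line in lines: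
--             if any(word in line.lower() for word in question_words):
--                 relevant_lines.append(line)
--
--         if relevant_lines:
--             return '\n'.join(relevant_lines[:5])  # أول 5 أسطر مناسبة
--
--     return None
-- ===== SOURCE B (Python) =====
-- def search_in_data(question, data_content):
--     """Single fused pass over the lines: collect matching lines and which
--     question words appear anywhere, instead of a whole-text scan plus a
--     second line scan."""
--     question_words = question.lower().split()
--     relevant_lines = []
--     present = set()
--     for line in data_content.split('\n'):
--         low = line.lower()
--         matched = False
--         for w in question_words:
--             if w in low:
--                 present.add(w)
--                 matched = True
--         if matched:
--             relevant_lines.append(line)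
--     if sum(1 for w in question_words if w in present) >= 2 and relevant_lines:
--         return '\n'.join(relevant_lines[:5])
--     return None
-- ===== Notes on version B (the rewrite author's own statement) =====
-- stated objective: alternative
-- what changed: B replaces A's whole-lowered-text substring scan plus a separate second pass over the lines by one fused pass over the lines that simultaneously collects the matching lines and the set of question words present, using that a whitespace-free word occurs in the joined text iff it occurs in some line.
import Mathlib
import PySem

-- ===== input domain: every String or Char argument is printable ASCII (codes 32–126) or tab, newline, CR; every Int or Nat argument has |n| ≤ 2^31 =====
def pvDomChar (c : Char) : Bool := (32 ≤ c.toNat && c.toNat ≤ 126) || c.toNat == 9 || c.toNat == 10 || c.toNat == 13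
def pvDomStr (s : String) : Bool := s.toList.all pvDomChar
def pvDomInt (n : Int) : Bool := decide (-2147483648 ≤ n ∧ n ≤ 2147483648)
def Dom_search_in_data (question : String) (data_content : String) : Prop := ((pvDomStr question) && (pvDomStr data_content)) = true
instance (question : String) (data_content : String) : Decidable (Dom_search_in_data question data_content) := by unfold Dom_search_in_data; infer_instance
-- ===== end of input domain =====

-- B fuses A's whole-lowered-text word scan and separate line scan into one pass over the
-- lines collecting the matching lines and the set of question words present (alternative
-- decomposition, same asymptotic cost); equivalence is proved on all inputs.


-- ===== PORT A =====
-- literal port of A, on List Char (PySem.Chars primitives)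
def search_in_data (question : String) (data_content : String) : Option String :=
  if data_content.toList = [] then none
  else
    let question_words := PySem.Chars.split₀ (PySem.Chars.lower question.toList)
    let data_lower := PySem.Chars.lower data_content.toList
    let found_words := question_words.filter (fun w => PySem.Chars.isIn w data_lower)
    if 2 ≤ found_words.length then
      let lines := PySem.Chars.splitOn data_content.toList ['\n']
      let relevant_lines := lines.filter
        (fun line => question_words.any (fun w => PySem.Chars.isIn w (PySem.Chars.lower line)))
      if relevant_lines ≠ [] then
        some (String.ofList (PySem.Chars.join ['\n'] (PySem.List.slice relevant_lines none (some 5))))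
      else none
    else none

-- ===== PORT B =====
-- literal port of Source B: one fold over the lines carrying (relevant_lines, present-set)
def search_in_data_alt (question : String) (data_content : String) : Option String :=
  let question_words := PySem.Chars.split₀ (PySem.Chars.lower question.toList)
  let res := (PySem.Chars.splitOn data_content.toList ['\n']).foldl
    (fun (st : List (List Char) × PySem.Set (List Char)) line =>
      let low := PySem.Chars.lower line
      let inner := question_words.foldl
        (fun (pm : PySem.Set (List Char) × Bool) w =>
          if PySem.Chars.isIn w low then (PySem.Set.add pm.1 w, true) else pm)
        (st.2, false)
      if inner.2 then (st.1 ++ [line], inner.1) else (st.1, inner.1))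
    ([], PySem.Set.empty)
  if 2 ≤ question_words.countP (fun w => PySem.Set.contains res.2 w) ∧ res.1 ≠ [] then
    some (String.ofList (PySem.Chars.join ['\n'] (PySem.List.slice res.1 none (some 5))))
  else none

-- ===== PRECONDITION & SPEC =====
def Spec_search_in_data (question : String) (data_content : String) (out : Option String) : Prop := out = search_in_data_alt question data_content
instance (question : String) (data_content : String) (out : Option String) : Decidable (Spec_search_in_data question data_content out) := by unfold Spec_search_in_data; infer_instance

-- ===== CLAIM (what is proved, stated in full; the proofs are below) =====
def Claim_equal_search_in_data : Prop := ∀ (question : String) (data_content : String), Dom_search_in_data question data_content → Spec_search_in_data question data_content (search_in_data question data_content)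

-- ===== LEMMAS AND PROOFS =====

-- reference form of PySem.Chars.splitOn for a one-character separator
def sepParts (c : Char) : List Char → List Char → List (List Char)
  | [], cur => [cur.reverse]
  | x :: rest, cur =>
    if x = c then cur.reverse :: sepParts c rest [] else sepParts c rest (x :: cur)

lemma splitOn_go_eq (c : Char) (fuel : Nat) (l cur : List Char) (acc : List (List Char))
    (h : l.length < fuel) :
    PySem.Chars.splitOn.go [c] fuel l cur acc = acc.reverse ++ sepParts c l cur := by
  induction fuel generalizing l cur acc with
  | zero => omega
  | succ f ih =>
    cases l with
    | nil => simp [PySem.Chars.splitOn.go, sepParts]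
    | cons x rest =>
      by_cases hx : x = c
      · subst hx
        have : ([x].isPrefixOf (x :: rest)) = true := by simp [List.isPrefixOf]
        simp only [PySem.Chars.splitOn.go, this, if_pos, List.length_cons,
          List.drop_succ_cons, List.drop_zero, List.length_nil]
        rw [ih rest [] (cur.reverse :: acc) (by simpa using Nat.lt_of_succ_lt_succ h)]
        simp [sepParts]
      · have : ([c].isPrefixOf (x :: rest)) = false := by
          simp [List.isPrefixOf]; exact fun hh => (hx hh.symm).elim
        simp only [PySem.Chars.splitOn.go, this]
        rw [if_neg (by simp)]
        rw [ih rest (x :: cur) acc (by simpa using Nat.lt_of_succ_lt_succ h)]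
        simp [sepParts, hx]

lemma splitOn_eq_sepParts (c : Char) (s : List Char) :
    PySem.Chars.splitOn s [c] = sepParts c s [] := by
  unfold PySem.Chars.splitOn
  rw [splitOn_go_eq c (s.length + 1) s [] [] (by omega)]
  simp

lemma sepParts_ne_nil (c : Char) (l cur : List Char) : sepParts c l cur ≠ [] := by
  induction l generalizing cur with
  | nil => simp [sepParts]
  | cons x rest ih => by_cases hx : x = c <;> simp [sepParts, hx, ih]

lemma join_cons_of_ne_nil (sep a : List Char) (ps : List (List Char)) (h : ps ≠ []) :
    PySem.Chars.join sep (a :: ps) = a ++ sep ++ PySem.Chars.join sep ps := by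
  cases ps with
  | nil => exact absurd rfl h
  | cons b t => exact PySem.Chars.join_cons_cons sep a b t

lemma join_sepParts (c : Char) (l cur : List Char) :
    PySem.Chars.join [c] (sepParts c l cur) = cur.reverse ++ l := by
  induction l generalizing cur with
  | nil => simp [sepParts, PySem.Chars.join_singleton]
  | cons x rest ih =>
    by_cases hx : x = c
    · subst hx
      rw [sepParts, if_pos rfl, join_cons_of_ne_nil _ _ _ (sepParts_ne_nil x rest []), ih]
      simp
    · rw [sepParts, if_neg hx, ih]
      simp

-- infix across a single separator character not occurring in w
lemma infix_append_single {w a b : List Char} {c : Char} (hc : c ∉ w) :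
    w <:+: a ++ c :: b ↔ w <:+: a ∨ w <:+: b := by
  constructor
  · intro h
    induction a with
    | nil =>
      rw [List.nil_append, List.infix_cons_iff] at h
      rcases h with h | h
      · left
        cases w with
        | nil => simp
        | cons y ys =>
          obtain ⟨t, ht⟩ := h
          have hy : y = c := by
            have := congrArg (fun l => l.head?) ht
            simpa using this
          exact absurd (by simp [hy] : c ∈ y :: ys) hc
      · right; exact h
    | cons x a' ih =>
      rw [List.cons_append, List.infix_cons_iff] at h
      rcases h with h | h
      · -- w <+: x :: (a' ++ c :: b); since c ∉ w, w stays within x :: a'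
        left
        have hlen : w.length ≤ (x :: a').length := by
          by_contra hlen
          have hidx : (x :: a').length < w.length := by omega
          have h2 : (x :: (a' ++ c :: b))[(x :: a').length]'(by simp) =
              w[(x :: a').length]'(hidx) := (List.IsPrefix.getElem h _).symm
          have h3 : (x :: (a' ++ c :: b))[(x :: a').length]'(by simp) = c := by
            simp
          exact hc (h3 ▸ h2 ▸ List.getElem_mem _)
        have hw : w = (x :: a').take w.length := by
          have h1 : w = ((x :: a') ++ c :: b).take w.length := by
            simpa using List.prefix_iff_eq_take.1 h
          rwa [List.take_append_of_le_length hlen] at h1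
        exact (hw ▸ List.take_prefix _ _).isInfix
      · rcases ih h with h | h
        · exact Or.inl (h.trans (List.suffix_cons x a').isInfix)
        · exact Or.inr h
  · intro h
    rcases h with h | h
    · exact h.trans ⟨[], c :: b, by simp⟩
    · exact h.trans ⟨a ++ [c], [], by simp⟩

lemma infix_join_iff {w : List Char} {c : Char} (hc : c ∉ w) :
    ∀ (ps : List (List Char)), ps ≠ [] →
      (w <:+: PySem.Chars.join [c] ps ↔ ∃ p ∈ ps, w <:+: p) := by
  intro ps
  induction ps with
  | nil => intro h; exact absurd rfl h
  | cons p t ih =>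
    intro _
    cases t with
    | nil => simp [PySem.Chars.join_singleton]
    | cons q r =>
      rw [join_cons_of_ne_nil _ _ _ (by simp)]
      rw [List.append_assoc]
      have : ([c] ++ PySem.Chars.join [c] (q :: r)) = c :: PySem.Chars.join [c] (q :: r) := rfl
      rw [this, infix_append_single hc, ih (by simp)]
      simp

-- words produced by split₀ are nonempty and whitespace-free
lemma split₀_go_words (l : List Char) (cur : List Char) (acc : List (List Char))
    (hacc : ∀ w ∈ acc, w ≠ [] ∧ ∀ ch ∈ w, PySem.Chars.isspace ch = false)
    (hcur : ∀ ch ∈ cur, PySem.Chars.isspace ch = false) :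
    ∀ w ∈ PySem.Chars.split₀.go l cur acc, w ≠ [] ∧ ∀ ch ∈ w, PySem.Chars.isspace ch = false := by
  induction l generalizing cur acc with
  | nil =>
    rw [PySem.Chars.split₀.go.eq_def]
    by_cases hc : cur.isEmpty
    · simpa [hc] using fun w hw => hacc w hw
    · rw [Bool.not_eq_true] at hc
      simp only [hc, Bool.false_eq_true, if_false, List.reverse_cons]
      intro w hw
      rcases List.mem_append.1 hw with hw | hw
      · exact hacc w (List.mem_reverse.1 hw)
      · have hw' : w = cur.reverse := by simpa using hw
        subst hw'
        exact ⟨by simpa [List.isEmpty_iff] using hc, fun ch hch => hcur ch (List.mem_reverse.1 hch)⟩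
  | cons c rest ih =>
    rw [PySem.Chars.split₀.go.eq_def]
    by_cases hs : PySem.Chars.isspace c
    · by_cases hc : cur.isEmpty
      · simpa [hs, hc] using ih [] acc hacc (by simp)
      · simp only [hs, hc, Bool.false_eq_true, if_true, if_false]
        refine ih [] (cur.reverse :: acc) ?_ (by simp)
        intro w hw
        rcases List.mem_cons.1 hw with hw | hw
        · subst hw
          rw [Bool.not_eq_true] at hc
          exact ⟨by simpa [List.isEmpty_iff] using hc, fun ch hch => hcur ch (List.mem_reverse.1 hch)⟩
        · exact hacc w hw
    · rw [Bool.not_eq_true] at hs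
      simp only [hs, Bool.false_eq_true, if_false]
      refine ih (c :: cur) acc hacc ?_
      intro ch hch
      rcases List.mem_cons.1 hch with hch | hch
      · subst hch; exact hs
      · exact hcur ch hch

lemma split₀_words (s : List Char) :
    ∀ w ∈ PySem.Chars.split₀ s, w ≠ [] ∧ '\n' ∉ w := by
  intro w hw
  have h := split₀_go_words s [] [] (by simp) (by simp) w hw
  refine ⟨h.1, fun hmem => ?_⟩
  have := h.2 '\n' hmem
  simp [PySem.Chars.isspace] at this

-- map distributes over join
lemma map_join (f : Char → Char) (sep : List Char) (ps : List (List Char)) :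
    (PySem.Chars.join sep ps).map f
      = PySem.Chars.join (sep.map f) (ps.map (List.map f)) := by
  induction ps with
  | nil => simp [PySem.Chars.join_nil]
  | cons p t ih =>
    cases t with
    | nil => simp [PySem.Chars.join_singleton]
    | cons q r =>
      rw [PySem.Chars.join_cons_cons,
        show List.map (List.map f) (p :: q :: r)
            = List.map f p :: List.map f q :: List.map (List.map f) r from rfl,
        PySem.Chars.join_cons_cons,
        show (List.map f q :: List.map (List.map f) r)
            = List.map (List.map f) (q :: r) from rfl,
        ← ih]
      simp

-- a newline-free word occurs in the lowered text iff it occurs in some lowered line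
lemma isIn_lower_splitOn {w : List Char} (hw : '\n' ∉ w) (dc : List Char) :
    PySem.Chars.isIn w (PySem.Chars.lower dc) = true ↔
      ∃ l ∈ PySem.Chars.splitOn dc ['\n'], PySem.Chars.isIn w (PySem.Chars.lower l) = true := by
  have hdc : PySem.Chars.join ['\n'] (sepParts '\n' dc []) = dc := by
    simpa using join_sepParts '\n' dc []
  have hlow : PySem.Chars.lower dc
      = PySem.Chars.join ['\n'] ((sepParts '\n' dc []).map PySem.Chars.lower) := by
    conv_lhs => rw [← hdc]
    simp only [PySem.Chars.lower, map_join, List.map_cons, List.map_nil,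
      show PySem.Chars.lowerChar '\n' = '\n' from by decide]
    rfl
  rw [hlow, PySem.Chars.isIn_iff_infix,
    infix_join_iff hw _ (by simpa using sepParts_ne_nil '\n' dc []),
    splitOn_eq_sepParts]
  constructor
  · rintro ⟨p, hp, hinf⟩
    rcases List.mem_map.1 hp with ⟨l, hl, rfl⟩
    exact ⟨l, hl, (PySem.Chars.isIn_iff_infix _ _).2 hinf⟩
  · rintro ⟨l, hl, hin⟩
    exact ⟨PySem.Chars.lower l, List.mem_map.2 ⟨l, hl, rfl⟩,
      (PySem.Chars.isIn_iff_infix _ _).1 hin⟩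

-- B's inner fold over the question words
lemma inner_fold_spec (qws : List (List Char)) (low : List Char)
    (p : PySem.Set (List Char)) (b : Bool) :
    (qws.foldl
      (fun (pm : PySem.Set (List Char) × Bool) w =>
        if PySem.Chars.isIn w low then (PySem.Set.add pm.1 w, true) else pm) (p, b)).2
      = (b || qws.any (fun w => PySem.Chars.isIn w low)) ∧
    ∀ x, x ∈ (qws.foldl
      (fun (pm : PySem.Set (List Char) × Bool) w =>
        if PySem.Chars.isIn w low then (PySem.Set.add pm.1 w, true) else pm) (p, b)).1
      ↔ x ∈ p ∨ (x ∈ qws ∧ PySem.Chars.isIn x low = true) := by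
  induction qws generalizing p b with
  | nil => simp
  | cons w t ih =>
    by_cases hwl : PySem.Chars.isIn w low = true
    · simp only [List.foldl_cons]
      rw [if_pos hwl]
      obtain ⟨h2, h1⟩ := ih (PySem.Set.add p w) true
      refine ⟨by rw [h2]; simp [hwl], fun x => ?_⟩
      rw [h1 x, PySem.Set.mem_add]
      constructor
      · rintro ((hx | rfl) | ⟨hx, hx2⟩)
        · exact Or.inl hx
        · exact Or.inr ⟨by simp, hwl⟩
        · exact Or.inr ⟨List.mem_cons_of_mem _ hx, hx2⟩
      · rintro (hx | ⟨hx, hx2⟩)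
        · exact Or.inl (Or.inl hx)
        · rcases List.mem_cons.1 hx with rfl | hx
          · exact Or.inl (Or.inr rfl)
          · exact Or.inr ⟨hx, hx2⟩
    · simp only [List.foldl_cons]
      rw [if_neg hwl]
      obtain ⟨h2, h1⟩ := ih p b
      have hwl' : PySem.Chars.isIn w low = false := by simpa using hwl
      refine ⟨by rw [h2]; simp [hwl'], fun x => ?_⟩
      rw [h1 x]
      constructor
      · rintro (hx | ⟨hx, hx2⟩)
        · exact Or.inl hx
        · exact Or.inr ⟨List.mem_cons_of_mem _ hx, hx2⟩
      · rintro (hx | ⟨hx, hx2⟩)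
        · exact Or.inl hx
        · rcases List.mem_cons.1 hx with rfl | hx
          · exact absurd hx2 hwl
          · exact Or.inr ⟨hx, hx2⟩

-- B's outer fold over the lines
lemma outer_fold_spec (qws : List (List Char)) (lines : List (List Char))
    (rel : List (List Char)) (p : PySem.Set (List Char)) :
    (lines.foldl
      (fun (st : List (List Char) × PySem.Set (List Char)) line =>
        let low := PySem.Chars.lower line
        let inner := qws.foldl
          (fun (pm : PySem.Set (List Char) × Bool) w =>
            if PySem.Chars.isIn w low then (PySem.Set.add pm.1 w, true) else pm)
          (st.2, false)
        if inner.2 then (st.1 ++ [line], inner.1) else (st.1, inner.1)) (rel, p)).1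
      = rel ++ lines.filter
          (fun l => qws.any (fun w => PySem.Chars.isIn w (PySem.Chars.lower l))) ∧
    ∀ x, x ∈ (lines.foldl
      (fun (st : List (List Char) × PySem.Set (List Char)) line =>
        let low := PySem.Chars.lower line
        let inner := qws.foldl
          (fun (pm : PySem.Set (List Char) × Bool) w =>
            if PySem.Chars.isIn w low then (PySem.Set.add pm.1 w, true) else pm)
          (st.2, false)
        if inner.2 then (st.1 ++ [line], inner.1) else (st.1, inner.1)) (rel, p)).2
      ↔ x ∈ p ∨ (x ∈ qws ∧ ∃ l ∈ lines, PySem.Chars.isIn x (PySem.Chars.lower l) = true) := by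
  induction lines generalizing rel p with
  | nil => simp
  | cons line t ih =>
    obtain ⟨hin2, hin1⟩ := inner_fold_spec qws (PySem.Chars.lower line) p false
    simp only [List.foldl_cons]
    by_cases hm : qws.any (fun w => PySem.Chars.isIn w (PySem.Chars.lower line))
    · rw [if_pos (by rw [hin2]; simpa using hm)]
      obtain ⟨g1, g2⟩ := ih (rel ++ [line]) _
      refine ⟨by rw [g1]; simp [hm], fun x => ?_⟩
      rw [g2 x, hin1 x]
      constructor
      · rintro ((hx | ⟨hx, hx2⟩) | ⟨hx, l, hl, hl2⟩)
        · exact Or.inl hx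
        · exact Or.inr ⟨hx, line, by simp, hx2⟩
        · exact Or.inr ⟨hx, l, List.mem_cons_of_mem _ hl, hl2⟩
      · rintro (hx | ⟨hx, l, hl, hl2⟩)
        · exact Or.inl (Or.inl hx)
        · rcases List.mem_cons.1 hl with rfl | hl
          · exact Or.inl (Or.inr ⟨hx, hl2⟩)
          · exact Or.inr ⟨hx, l, hl, hl2⟩
    · rw [if_neg (by rw [hin2]; simpa using hm)]
      obtain ⟨g1, g2⟩ := ih rel _
      refine ⟨by rw [g1]; simp [hm], fun x => ?_⟩
      rw [g2 x, hin1 x]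
      constructor
      · rintro ((hx | ⟨hx, hx2⟩) | ⟨hx, l, hl, hl2⟩)
        · exact Or.inl hx
        · exact Or.inr ⟨hx, line, by simp, hx2⟩
        · exact Or.inr ⟨hx, l, List.mem_cons_of_mem _ hl, hl2⟩
      · rintro (hx | ⟨hx, l, hl, hl2⟩)
        · exact Or.inl (Or.inl hx)
        · rcases List.mem_cons.1 hl with rfl | hl
          · exact Or.inl (Or.inr ⟨hx, hl2⟩)
          · exact Or.inr ⟨hx, l, hl, hl2⟩

-- ===== VERDICT (by name: the statement is the Claim_ definition above) =====
theorem search_in_data_spec : Claim_equal_search_in_data := by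
  intro question data_content _
  unfold Spec_search_in_data search_in_data search_in_data_alt
  simp only []
  set dc := data_content.toList with hdcdef
  set qws := PySem.Chars.split₀ (PySem.Chars.lower question.toList) with hqws
  set lines := PySem.Chars.splitOn dc ['\n'] with hlines
  obtain ⟨g1, g2⟩ := outer_fold_spec qws lines [] PySem.Set.empty
  have hwords := split₀_words (PySem.Chars.lower question.toList)
  -- counts agree
  have hcnt : (qws.countP fun w => PySem.Set.contains
        ((lines.foldl
          (fun (st : List (List Char) × PySem.Set (List Char)) line =>
            let low := PySem.Chars.lower line
            let inner := qws.foldl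
              (fun (pm : PySem.Set (List Char) × Bool) w =>
                if PySem.Chars.isIn w low then (PySem.Set.add pm.1 w, true) else pm)
              (st.2, false)
            if inner.2 then (st.1 ++ [line], inner.1) else (st.1, inner.1)) ([], PySem.Set.empty)).2) w)
      = (qws.filter fun w => PySem.Chars.isIn w (PySem.Chars.lower dc)).length := by
    rw [List.countP_eq_length_filter]
    refine congrArg List.length (List.filter_congr ?_)
    intro w hwq
    obtain ⟨hne, hnl⟩ := hwords w hwq
    rw [Bool.eq_iff_iff, PySem.Set.contains_iff, g2 w]
    rw [isIn_lower_splitOn hnl dc]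
    simp only [PySem.Set.empty, List.not_mem_nil, false_or, ← hlines]
    constructor
    · rintro ⟨_, h⟩; exact h
    · intro h; exact ⟨hwq, h⟩
  by_cases hnil : dc = []
  · rw [if_pos hnil]
    -- B also returns none on empty data: the single line "" matches no (nonempty) word
    have hlinesnil : lines = [[]] := by
      rw [hlines, hnil, splitOn_eq_sepParts]; rfl
    have hfilter : (lines.filter
        fun l => qws.any fun w => PySem.Chars.isIn w (PySem.Chars.lower l)) = [] := by
      rw [hlinesnil]
      simp only [List.filter_cons, List.filter_nil]
      rw [if_neg ?_]
      simp only [Bool.not_eq_true, List.any_eq_false]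
      intro w hwq
      obtain ⟨hne, _⟩ := hwords w hwq
      simp only [PySem.Chars.isIn_eq_false_iff]
      intro hinf
      have hw0 : w <:+: ([] : List Char) := by simpa [PySem.Chars.lower] using hinf
      exact hne (List.infix_nil.1 hw0)
    rw [if_neg ?_]
    · intro ⟨_, hrel⟩
      exact hrel (by rw [g1, hfilter]; rfl)
  · rw [if_neg hnil, hcnt, g1, List.nil_append]
    split_ifs <;> first | rfl | tauto
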